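-- pv_equiv track=rewrite | github.com/egeriicw/watttime-grid | regression/2011_REGS/engine.py | square
-- ===== SOURCE A (Python) =====
-- def square(triangular):
-- #"squares" and returns a "triangular" list into a full list, extracting appropriate values
--     range_length = len(triangular)
--     index = 0
--     for row in triangular:
--         for element in reversed(range(0, index)):
--             row.insert(0,triangular[element][index-1])
--         index += 1
--     return triangular
-- ===== SOURCE B (Python) =====
-- def square(triangular):
--     # Compute every output row directly from the ORIGINAL triangular values
--     # (closed form: row i = [triangular[c][i-1-c] for c in range(i)] + row i),
--     # then write the rows back in place so mutation/identity matches A.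
--     n = len(triangular)
--     new_rows = [[triangular[c][i - 1 - c] for c in range(i)] + list(triangular[i])
--                 for i in range(n)]
--     for i in range(n):
--         triangular[i][:] = new_rows[i]
--     return triangular
-- ===== Notes on version B (the rewrite author's own statement) =====
-- stated objective: faster
-- what changed: A builds each row by repeatedly prepending (insert(0,...)) values read from already-mutated earlier rows; B computes every output row in one shot by the closed formula row_i = [triangular[c][i-1-c] for c in range(i)] + row_i over the original values, then writes the rows back in place.
import Mathlib
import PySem

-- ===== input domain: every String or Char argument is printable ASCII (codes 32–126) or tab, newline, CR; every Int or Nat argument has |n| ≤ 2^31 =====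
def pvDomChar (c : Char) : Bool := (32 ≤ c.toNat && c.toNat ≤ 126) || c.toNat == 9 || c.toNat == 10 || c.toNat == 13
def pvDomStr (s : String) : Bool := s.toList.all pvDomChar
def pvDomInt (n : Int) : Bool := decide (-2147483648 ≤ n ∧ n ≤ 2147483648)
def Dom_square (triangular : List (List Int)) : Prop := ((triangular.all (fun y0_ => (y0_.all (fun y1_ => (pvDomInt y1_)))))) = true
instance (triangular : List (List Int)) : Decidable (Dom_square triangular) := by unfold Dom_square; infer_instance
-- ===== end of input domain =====

-- B recomputes each row by a direct formula from the original values instead of A's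
-- in-place incremental prepending (objective: simpler). Both Pythons mutate the rows of
-- the argument in place and return the same list object; the equivalence proved here is
-- about the return value.

-- ===== PORT A =====
-- A mutates `triangular` row by row; the state is the whole list, rows set one at a time.
-- `row.insert(0, x)` is cons; `reversed(range(0, index))` is (List.range index).reverse.
-- Python raises IndexError when triangular[element][index-1] is out of range; those
-- inputs are excluded by Pre_square, and the port uses getD defaults ([] / 0) there.
def squareStep (st : List (List Int)) (i : Nat) : List (List Int) :=
  st.set i
    ((List.range i).reverse.foldl
      (fun r e => ((st.getD e []).getD (i - 1) 0) :: r)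
      (st.getD i []))

def square (triangular : List (List Int)) : List (List Int) :=
  (List.range triangular.length).foldl squareStep triangular

-- ===== PORT B =====
-- Source B: new_rows computed by one comprehension from the original, then written back
-- (the write-back is the in-place mutation; the returned value is new_rows row by row).
def square_alt (triangular : List (List Int)) : List (List Int) :=
  (List.range triangular.length).map (fun i =>
    ((List.range i).map (fun c => (triangular.getD c []).getD (i - 1 - c) 0))
      ++ triangular.getD i [])

-- ===== PRECONDITION & SPEC =====
-- Pre_square: exactly the inputs on which Python A returns (no IndexError): every row c
-- before the last must be long enough, len(triangular[c]) + c + 1 ≥ len(triangular).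
def Pre_square (triangular : List (List Int)) : Prop :=
  ∀ c < triangular.length,
    triangular.length ≤ (triangular.getD c []).length + c + 1

instance (triangular : List (List Int)) : Decidable (Pre_square triangular) := by
  unfold Pre_square; infer_instance

def pvWitness_square : List (List Int) := [[1, 2, 3], [4, 5], [6]]

def Spec_square (triangular : List (List Int)) (out : List (List Int)) : Prop :=
  out = square_alt triangular
instance (triangular : List (List Int)) (out : List (List Int)) : Decidable (Spec_square triangular out) := by unfold Spec_square; infer_instance

-- ===== CLAIM (what is proved, stated in full; the proofs are below) =====
def Claim_equal_square : Prop := ∀ (triangular : List (List Int)), Dom_square triangular → Pre_square triangular → Spec_square triangular (square triangular)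

-- ===== LEMMAS AND PROOFS =====

-- the closed-form row i of the output, computed from the original input
def brow (t : List (List Int)) (i : Nat) : List Int :=
  ((List.range i).map (fun c => (t.getD c []).getD (i - 1 - c) 0)) ++ t.getD i []

-- the state of A's loop after k outer iterations
def stDef (t : List (List Int)) (k : Nat) : List (List Int) :=
  (List.range t.length).map (fun i => if i < k then brow t i else t.getD i [])

theorem stDef_zero (t : List (List Int)) : stDef t 0 = t := by
  apply List.ext_getElem
  · simp [stDef]
  · intro i h1 h2
    simp [stDef, List.getD, List.getElem?_eq_getElem h2]

theorem stDef_getD (t : List (List Int)) (k e : Nat) (he : e < t.length) :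
    (stDef t k).getD e [] = if e < k then brow t e else t.getD e [] := by
  simp [stDef, List.getD, he]

theorem foldl_cons_rev (v : Nat → Int) (init : List Int) (k : Nat) :
    (List.range k).reverse.foldl (fun r e => v e :: r) init
      = (List.range k).map v ++ init := by
  induction k generalizing init with
  | zero => simp
  | succ k ih =>
      rw [List.range_succ, List.reverse_append]
      simp only [List.reverse_cons, List.reverse_nil, List.nil_append,
        List.singleton_append, List.foldl_cons]
      rw [ih (v k :: init)]
      simp

theorem brow_getD (t : List (List Int)) (e k : Nat) (he : e < k) :
    (brow t e).getD (k - 1) 0 = (t.getD e []).getD (k - 1 - e) 0 := by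
  unfold brow
  rw [List.getD_append_right]
  · simp
  · simpa using Nat.le_sub_one_of_lt he

theorem squareStep_stDef (t : List (List Int)) (k : Nat) (hk : k < t.length) :
    squareStep (stDef t k) k = stDef t (k + 1) := by
  unfold squareStep
  rw [foldl_cons_rev]
  have hrow : ((List.range k).map
      (fun e => ((stDef t k).getD e []).getD (k - 1) 0)) ++ (stDef t k).getD k []
      = brow t k := by
    unfold brow
    congr 1
    · apply List.map_congr_left
      intro e he
      rw [List.mem_range] at he
      rw [stDef_getD t k e (lt_trans he hk), if_pos he, brow_getD t e k he]
    · rw [stDef_getD t k k hk, if_neg (lt_irrefl k)]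
  rw [hrow]
  apply List.ext_getElem
  · simp [stDef]
  · intro i h1 h2
    simp only [stDef, List.length_map, List.length_range] at h1 h2 ⊢
    rcases eq_or_ne i k with rfl | hne
    · simp [List.getElem_map, List.getElem_range]
    · rw [List.getElem_set_ne (by omega)]
      simp only [List.getElem_map, List.getElem_range]
      by_cases h : i < k
      · rw [if_pos h, if_pos (by omega)]
      · rw [if_neg h, if_neg (by omega)]

theorem foldl_range_stDef (t : List (List Int)) (k : Nat) (hk : k ≤ t.length) :
    (List.range k).foldl squareStep t = stDef t k := by
  induction k with
  | zero => simp [stDef_zero]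
  | succ k ih =>
      rw [List.range_succ, List.foldl_append, ih (by omega), List.foldl_cons,
        List.foldl_nil, squareStep_stDef t k (by omega)]

theorem square_eq_alt (t : List (List Int)) : square t = square_alt t := by
  unfold square square_alt
  rw [foldl_range_stDef t t.length (le_refl _)]
  unfold stDef
  apply List.map_congr_left
  intro i hi
  rw [List.mem_range] at hi
  rw [if_pos hi]
  rfl

-- ===== VERDICT (by name: the statement is the Claim_ definition above) =====
theorem square_spec : Claim_equal_square := by
  intro t _ _
  unfold Spec_square
  exact square_eq_alt t
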